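-- pv_equiv track=rewrite | github.com/esuarkb/mypinkassistant | mk_chat_core.py | parse_add_remove
-- ===== SOURCE A (Python) =====
-- def parse_add_remove(message: str):
--     m = (message or "").strip()
--     low = m.lower().strip()
--
--     # ADD keywords (EN + ES)
--     for kw in ("add ", "add:", "agrega ", "agrega:", "añade ", "añade:", "anade ", "anade:"):
--         if low.startswith(kw):
--             rest = m[len(kw):].strip()
--             return ("add", rest)
--
--     # REMOVE keywords (EN + ES)
--     for kw in (
--         "remove ", "remove:", "delete ", "delete:",
--         "quita ", "quita:", "quitar ", "quitar:", "elimina ", "elimina:", "borrar ", "borrar:"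
--     ):
--         if low.startswith(kw):
--             rest = m[len(kw):].strip()
--             return ("remove", rest)
--
--     return (None, None)
-- ===== SOURCE B (Python) =====
-- ADD_WORDS = {"add", "agrega", "añade", "anade"}
-- REMOVE_WORDS = {"remove", "delete", "quita", "quitar", "elimina", "borrar"}
--
-- def parse_add_remove(message: str):
--     m = (message or "").strip()
--     low = m.lower().strip()
--     i = next((j for j, c in enumerate(low) if c == " " or c == ":"), None)
--     if i is None:
--         return (None, None)
--     word = low[:i]
--     if word in ADD_WORDS:
--         return ("add", m[i + 1:].strip())
--     if word in REMOVE_WORDS: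
--         return ("remove", m[i + 1:].strip())
--     return (None, None)
-- ===== Notes on version B (the rewrite author's own statement) =====
-- stated objective: alternative
-- what changed: Instead of testing the message against 20 keyword prefixes in two startswith loops, B scans once for the first space/colon separator, takes the token before it and decides add/remove by one set-membership lookup.
import Mathlib
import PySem

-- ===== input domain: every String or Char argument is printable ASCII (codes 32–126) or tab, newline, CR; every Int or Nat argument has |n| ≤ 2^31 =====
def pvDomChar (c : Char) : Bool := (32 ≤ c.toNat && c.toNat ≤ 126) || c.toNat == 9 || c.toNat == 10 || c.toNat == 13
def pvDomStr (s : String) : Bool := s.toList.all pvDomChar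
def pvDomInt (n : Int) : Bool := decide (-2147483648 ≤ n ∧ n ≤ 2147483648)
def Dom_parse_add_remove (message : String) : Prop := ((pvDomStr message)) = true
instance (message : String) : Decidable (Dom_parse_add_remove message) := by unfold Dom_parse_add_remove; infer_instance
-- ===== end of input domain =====

-- B replaces A's two startswith-loops over 20 keyword prefixes by one scan for the first
-- space/colon and a single membership test of the token before it (alternative decomposition).

-- ===== PORT A =====
-- the two keyword tuples of A, as lists of char-lists
def pvAddKws : List (List Char) :=
  [['a', 'd', 'd', ' '], ['a', 'd', 'd', ':'], ['a', 'g', 'r', 'e', 'g', 'a', ' '], ['a', 'g', 'r', 'e', 'g', 'a', ':'],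
   ['a', 'ñ', 'a', 'd', 'e', ' '], ['a', 'ñ', 'a', 'd', 'e', ':'], ['a', 'n', 'a', 'd', 'e', ' '], ['a', 'n', 'a', 'd', 'e', ':']]
def pvRemoveKws : List (List Char) :=
  [['r', 'e', 'm', 'o', 'v', 'e', ' '], ['r', 'e', 'm', 'o', 'v', 'e', ':'], ['d', 'e', 'l', 'e', 't', 'e', ' '], ['d', 'e', 'l', 'e', 't', 'e', ':'],
   ['q', 'u', 'i', 't', 'a', ' '], ['q', 'u', 'i', 't', 'a', ':'], ['q', 'u', 'i', 't', 'a', 'r', ' '], ['q', 'u', 'i', 't', 'a', 'r', ':'],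
   ['e', 'l', 'i', 'm', 'i', 'n', 'a', ' '], ['e', 'l', 'i', 'm', 'i', 'n', 'a', ':'], ['b', 'o', 'r', 'r', 'a', 'r', ' '], ['b', 'o', 'r', 'r', 'a', 'r', ':']]

-- A's 'for kw in (…): if low.startswith(kw): …' — first matching keyword, if any
def pvFindKw (low : List Char) : List (List Char) → Option (List Char)
  | [] => none
  | kw :: rest => if PySem.Chars.startswith low kw then some kw else pvFindKw low rest

def parse_add_remove (message : String) : Option String × Option String :=
  let m := PySem.Chars.strip message.toList          -- (message or "").strip(); "" strips to itself
  let low := PySem.Chars.strip (PySem.Chars.lower m) -- m.lower().strip()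
  match pvFindKw low pvAddKws with
  | some kw => (some "add",
      some (String.ofList (PySem.Chars.strip (PySem.List.slice m (some (kw.length : Int)) none))))  -- m[len(kw):].strip()
  | none =>
    match pvFindKw low pvRemoveKws with
    | some kw => (some "remove",
        some (String.ofList (PySem.Chars.strip (PySem.List.slice m (some (kw.length : Int)) none))))
    | none => (none, none)

-- ===== PORT B =====
def pvSep (c : Char) : Bool := c == ' ' || c == ':'
def pvAddWords : List (List Char) :=
  [['a', 'd', 'd'], ['a', 'g', 'r', 'e', 'g', 'a'], ['a', 'ñ', 'a', 'd', 'e'], ['a', 'n', 'a', 'd', 'e']]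
def pvRemoveWords : List (List Char) :=
  [['r', 'e', 'm', 'o', 'v', 'e'], ['d', 'e', 'l', 'e', 't', 'e'], ['q', 'u', 'i', 't', 'a'], ['q', 'u', 'i', 't', 'a', 'r'],
   ['e', 'l', 'i', 'm', 'i', 'n', 'a'], ['b', 'o', 'r', 'r', 'a', 'r']]

def parse_add_remove_alt (message : String) : Option String × Option String :=
  let m := PySem.Chars.strip message.toList
  let low := PySem.Chars.strip (PySem.Chars.lower m)
  match low.findIdx? pvSep with                      -- first j with low[j] in " :", else None
  | none => (none, none)
  | some i =>
    let word := low.take i                           -- low[:i]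
    let rest := some (String.ofList (PySem.Chars.strip (PySem.List.slice m (some ((i : Int) + 1)) none)))  -- m[i+1:].strip()
    if word ∈ pvAddWords then (some "add", rest)
    else if word ∈ pvRemoveWords then (some "remove", rest)
    else (none, none)

-- ===== PRECONDITION & SPEC =====
def Spec_parse_add_remove (message : String) (out : Option String × Option String) : Prop := out = parse_add_remove_alt message
instance (message : String) (out : Option String × Option String) : Decidable (Spec_parse_add_remove message out) := by unfold Spec_parse_add_remove; infer_instance

-- ===== CLAIM (what is proved, stated in full; the proofs are below) =====
def Claim_equal_parse_add_remove : Prop := ∀ (message : String), Dom_parse_add_remove message → Spec_parse_add_remove message (parse_add_remove message)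

-- ===== LEMMAS AND PROOFS =====

-- decidable facts about the keyword tables, checked by evaluation
lemma pvKws_lastSep_all :
    (pvAddKws.all (fun kw => kw.getLast?.elim false pvSep)
      && pvRemoveKws.all (fun kw => kw.getLast?.elim false pvSep)) = true := by decide

lemma pvAddKws_lastSep : ∀ kw ∈ pvAddKws, (kw.getLast?.elim false pvSep) = true := by
  have := pvKws_lastSep_all
  simp [List.all_eq_true] at this
  intro kw hkw; exact this.1 kw hkw

lemma pvRemoveKws_lastSep : ∀ kw ∈ pvRemoveKws, (kw.getLast?.elim false pvSep) = true := by
  have := pvKws_lastSep_all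
  simp [List.all_eq_true] at this
  intro kw hkw; exact this.2 kw hkw

lemma pvWords_sepFree_all :
    (pvAddWords.all (fun w => w.all (fun x => !pvSep x))
      && pvRemoveWords.all (fun w => w.all (fun x => !pvSep x))) = true := by decide

lemma pvAddWords_sepFree : ∀ w ∈ pvAddWords, ∀ x ∈ w, pvSep x = false := by
  have := pvWords_sepFree_all
  simp [List.all_eq_true] at this
  intro w hw x hx; simpa using this.1 w hw x hx

lemma pvRemoveWords_sepFree : ∀ w ∈ pvRemoveWords, ∀ x ∈ w, pvSep x = false := by
  have := pvWords_sepFree_all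
  simp [List.all_eq_true] at this
  intro w hw x hx; simpa using this.2 w hw x hx

-- if low contains no separator, no keyword (each ends in a separator) is a prefix of low
lemma pvFindKw_none (low : List Char) (h : low.findIdx? pvSep = none)
    (kws : List (List Char)) (hk : ∀ kw ∈ kws, (kw.getLast?.elim false pvSep) = true) :
    pvFindKw low kws = none := by
  induction kws with
  | nil => rfl
  | cons kw rest ih =>
    have hkw := hk kw (List.mem_cons_self ..)
    have hsw : PySem.Chars.startswith low kw = false := by
      by_contra hne
      have hpre : kw <+: low :=
        (PySem.Chars.startswith_iff low kw).1 (by simpa using hne)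
      obtain ⟨c, hc⟩ : ∃ c, kw.getLast? = some c := by
        cases hg : kw.getLast? with
        | none => rw [hg] at hkw; simp [Option.elim] at hkw
        | some c => exact ⟨c, rfl⟩
      have hcmem : c ∈ low := hpre.subset (List.mem_of_getLast? hc)
      have := (List.findIdx?_eq_none_iff.1 h) c hcmem
      rw [hc] at hkw
      simp [Option.elim] at hkw
      simp [hkw] at this
    unfold pvFindKw
    rw [hsw]
    simp only [Bool.false_eq_true, if_false]
    exact ih (fun kw' hm => hk kw' (List.mem_cons_of_mem _ hm))

-- low starts with w++[s] (w separator-free, s a separator) iff the first separator of low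
-- sits right after w and equals s
lemma pvSw_iff (low w : List Char) (s : Char) (i : Nat)
    (hw : ∀ c ∈ w, pvSep c = false) (hs : pvSep s = true)
    (hfind : low.findIdx? pvSep = some i) :
    PySem.Chars.startswith low (w ++ [s]) = true ↔ (low.take i = w ∧ low[i]? = some s) := by
  obtain ⟨hi, hpi, hmin⟩ := List.findIdx?_eq_some_iff_getElem.1 hfind
  constructor
  · intro hsw
    have hpre : (w ++ [s]) <+: low := (PySem.Chars.startswith_iff low _).1 hsw
    have hlen : w.length + 1 ≤ low.length := by
      have := hpre.length_le; simpa using this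
    have hgl : ∀ j (hj : j < w.length + 1), low[j]'(by omega) = (w ++ [s])[j]'(by simpa using hj) := by
      intro j hj
      exact (List.IsPrefix.getElem hpre (by simpa using hj)).symm
    have hieq : i = w.length := by
      rcases lt_trichotomy i w.length with hlt | heq | hgt
      · exfalso
        have hl : low[i] = w[i]'hlt := by
          rw [hgl i (by omega)]; exact List.getElem_append_left ..
        have := hw _ (List.getElem_mem hlt)
        rw [hl] at hpi; simp [this] at hpi
      · exact heq
      · exfalso
        have hl : low[w.length]'(by omega) = s := by
          rw [hgl w.length (by omega)]
          simp
        exact (hmin w.length hgt) (by rw [hl]; exact hs)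
    subst hieq
    constructor
    · exact ((List.prefix_iff_eq_take.1 ((List.prefix_append w [s]).trans hpre))).symm
    · have hl : low[w.length]'(by omega) = s := by
        rw [hgl w.length (by omega)]; simp
      rw [List.getElem?_eq_getElem (by omega), hl]
  · rintro ⟨ht, hg⟩
    have hwl : w.length = i := by
      have := congrArg List.length ht
      simpa [List.length_take, Nat.min_eq_left (Nat.le_of_lt hi)] using this.symm
    have : w ++ [s] = low.take (i + 1) := by
      rw [List.take_add_one, ht.symm, hg]
      simp [ht]
    rw [PySem.Chars.startswith_iff, this]
    exact List.take_prefix _ _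

-- A's scan over the ' '/':' pairs of a separator-free word list, characterised
lemma pvFindKw_pairs (low : List Char) (i : Nat) (c : Char)
    (hfind : low.findIdx? pvSep = some i) (hc : low[i]? = some c)
    (ws : List (List Char)) (hw : ∀ w ∈ ws, ∀ x ∈ w, pvSep x = false) :
    pvFindKw low (ws.flatMap fun w => [w ++ [' '], w ++ [':']]) =
      if low.take i ∈ ws then some (low.take i ++ [c]) else none := by
  have hsep : pvSep c = true := by
    obtain ⟨hi, hpi, _⟩ := List.findIdx?_eq_some_iff_getElem.1 hfind
    obtain ⟨h', hce⟩ := List.getElem?_eq_some_iff.1 hc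
    rw [← hce]; exact hpi
  induction ws with
  | nil => rfl
  | cons w ws ih =>
    have hw0 := hw w (List.mem_cons_self ..)
    have h1 := pvSw_iff low w ' ' i hw0 rfl hfind
    have h2 := pvSw_iff low w ':' i hw0 rfl hfind
    by_cases htw : low.take i = w
    · have hcs : c = ' ' ∨ c = ':' := by
        unfold pvSep at hsep
        rcases Bool.or_eq_true_iff.1 hsep with h | h
        · exact Or.inl (by exact of_decide_eq_true h)
        · exact Or.inr (by exact of_decide_eq_true h)
      simp only [List.flatMap_cons, List.cons_append, List.nil_append]
      rcases hcs with hcs | hcs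
      · have : PySem.Chars.startswith low (w ++ [' ']) = true := h1.2 ⟨htw, by rw [hc, hcs]⟩
        unfold pvFindKw
        rw [this]
        simp [htw, hcs]
      · have hno : PySem.Chars.startswith low (w ++ [' ']) = false := by
          rw [Bool.eq_false_iff]
          intro hcontra
          have := (h1.1 hcontra).2
          rw [hc, hcs] at this
          simp at this
        have hyes : PySem.Chars.startswith low (w ++ [':']) = true := h2.2 ⟨htw, by rw [hc, hcs]⟩
        unfold pvFindKw
        rw [hno]
        simp only [Bool.false_eq_true, if_false]
        unfold pvFindKw
        rw [hyes]
        simp [htw, hcs]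
    · have hno1 : PySem.Chars.startswith low (w ++ [' ']) = false := by
        rw [Bool.eq_false_iff]; intro hcontra; exact htw (h1.1 hcontra).1
      have hno2 : PySem.Chars.startswith low (w ++ [':']) = false := by
        rw [Bool.eq_false_iff]; intro hcontra; exact htw (h2.1 hcontra).1
      simp only [List.flatMap_cons, List.cons_append, List.nil_append]
      unfold pvFindKw
      rw [hno1]
      simp only [Bool.false_eq_true, if_false]
      unfold pvFindKw
      rw [hno2]
      simp only [Bool.false_eq_true, if_false]
      rw [ih (fun w' hm => hw w' (List.mem_cons_of_mem _ hm))]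
      simp [htw]


-- the two bodies agree for any stripped message m and its lower-cased form low
lemma pvMain (m low : List Char) :
    (match pvFindKw low pvAddKws with
     | some kw => ((some "add" : Option String),
         some (String.ofList (PySem.Chars.strip (PySem.List.slice m (some (kw.length : Int)) none))))
     | none =>
       match pvFindKw low pvRemoveKws with
       | some kw => (some "remove",
           some (String.ofList (PySem.Chars.strip (PySem.List.slice m (some (kw.length : Int)) none))))
       | none => (none, none)) =
    (match low.findIdx? pvSep with
     | none => ((none : Option String), (none : Option String))
     | some i =>
       let word := low.take i
       let rest := some (String.ofList (PySem.Chars.strip (PySem.List.slice m (some ((i : Int) + 1)) none)))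
       if word ∈ pvAddWords then (some "add", rest)
       else if word ∈ pvRemoveWords then (some "remove", rest)
       else (none, none)) := by
  cases hfind : low.findIdx? pvSep with
  | none =>
    rw [pvFindKw_none low hfind pvAddKws pvAddKws_lastSep,
        pvFindKw_none low hfind pvRemoveKws pvRemoveKws_lastSep]
  | some i =>
    obtain ⟨hi, _, _⟩ := List.findIdx?_eq_some_iff_getElem.1 hfind
    have hc : low[i]? = some low[i] := List.getElem?_eq_getElem hi
    have hA : pvAddKws = pvAddWords.flatMap (fun w => [w ++ [' '], w ++ [':']]) := by decide
    have hR : pvRemoveKws = pvRemoveWords.flatMap (fun w => [w ++ [' '], w ++ [':']]) := by decide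
    rw [hA, hR,
        pvFindKw_pairs low i low[i] hfind hc pvAddWords pvAddWords_sepFree,
        pvFindKw_pairs low i low[i] hfind hc pvRemoveWords pvRemoveWords_sepFree]
    have hmin2 : min ((i : Int) + 1) ((low.length : Int)) = (i : Int) + 1 := by omega
    by_cases h1 : low.take i ∈ pvAddWords
    · simp [h1, hmin2]
    · by_cases h2 : low.take i ∈ pvRemoveWords
      · simp [h1, h2, hmin2]
      · simp [h1, h2]

-- ===== VERDICT (by name: the statement is the Claim_ definition above) =====
theorem parse_add_remove_spec : Claim_equal_parse_add_remove := by
  intro message _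
  show parse_add_remove message = parse_add_remove_alt message
  exact pvMain (PySem.Chars.strip message.toList)
    (PySem.Chars.strip (PySem.Chars.lower (PySem.Chars.strip message.toList)))
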